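-- pv_equiv track=rewrite | github.com/mmishra4/DSA | Matrix.py | print_antidiagonal
-- ===== SOURCE A (Python) =====
-- def print_antidiagonal(A):
--     n = len(A)
--     N = 2 * n - 1
--
--     result = []
--
--     for i in range(N) :
--         result.append([])
--
--     # Push each element in the result vector
--     for i in range(n) :
--         for j in range(n) :
--             result[i + j].append(A[i][j])
--     for i in range((2*n)-1):
--             while len(result[i]) < n:
--                 result[i].append(0)
--     return result
-- ===== SOURCE B (Python) =====
-- def print_antidiagonal(A):
--     n = len(A)
--     res = []
--     for d in range(2 * n - 1):
--         lo = max(0, d - n + 1)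
--         hi = min(d, n - 1)
--         diag = [A[i][d - i] for i in range(lo, hi + 1)]
--         diag += [0] * (n - len(diag))
--         res.append(diag)
--     return res
-- ===== Notes on version B (the rewrite author's own statement) =====
-- stated objective: alternative
-- what changed: Replaces A's three-pass scatter (preallocate 2n-1 empty buckets, append each A[i][j] into bucket i+j, then a padding pass) by a single pass that gathers each antidiagonal d directly from its row range [max(0,d-n+1), min(d,n-1)] and pads it immediately.
import Mathlib
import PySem

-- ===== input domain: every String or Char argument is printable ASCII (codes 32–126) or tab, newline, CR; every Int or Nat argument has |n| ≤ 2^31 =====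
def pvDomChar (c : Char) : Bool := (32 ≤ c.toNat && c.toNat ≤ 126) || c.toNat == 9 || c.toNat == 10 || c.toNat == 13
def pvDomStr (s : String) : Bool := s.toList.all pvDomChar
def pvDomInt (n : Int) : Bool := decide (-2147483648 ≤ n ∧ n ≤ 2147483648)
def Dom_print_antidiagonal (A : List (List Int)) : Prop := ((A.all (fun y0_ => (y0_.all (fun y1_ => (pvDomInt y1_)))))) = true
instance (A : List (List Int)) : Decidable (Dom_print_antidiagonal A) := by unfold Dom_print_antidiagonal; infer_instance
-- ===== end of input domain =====

-- B groups matrix elements by antidiagonal via a direct per-diagonal gather instead of A's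
-- scatter-into-buckets-then-pad passes; same O(n^2) cost (objective: alternative decomposition).

-- ===== PORT A =====
-- the `while len(result[i]) < n: result[i].append(0)` padding loop
def padTo (n : Nat) (l : List Int) : List Int :=
  if l.length < n then padTo n (l ++ [0]) else l
termination_by n - l.length
decreasing_by simp; omega

def print_antidiagonal (A : List (List Int)) : List (List Int) :=
  -- n = len(A); for i in range(N): result.append([])
  -- then scatter: result[i+j].append(A[i][j]) (the getD defaults are never read under Pre_)
  -- then the padding pass over range(2n-1)
  (List.range (2 * A.length - 1)).foldl (fun res i => res.modify i (padTo A.length))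
    ((List.range A.length).foldl (fun res i =>
        (List.range A.length).foldl (fun res j =>
          res.modify (i + j) (fun l => l ++ [(A.getD i []).getD j 0])) res)
      (List.replicate (2 * A.length - 1) ([] : List Int)))

-- ===== PORT B =====
def print_antidiagonal_alt (A : List (List Int)) : List (List Int) :=
  -- n = len(A); per diagonal d: lo = max(0, d-n+1) (= d+1-n in Nat), hi = min(d, n-1),
  -- gather [A[i][d-i] for i in range(lo, hi+1)] and pad with n - len(diag) zeros
  (List.range (2 * A.length - 1)).map (fun d =>
    ((List.range' (d + 1 - A.length) (min d (A.length - 1) + 1 - (d + 1 - A.length))).map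
        (fun i => (A.getD i []).getD (d - i) 0)) ++
      List.replicate (A.length -
        ((List.range' (d + 1 - A.length) (min d (A.length - 1) + 1 - (d + 1 - A.length))).map
          (fun i => (A.getD i []).getD (d - i) 0)).length) 0)

-- ===== PRECONDITION & SPEC =====
-- Pre_ excludes exactly the ragged matrices with a row shorter than len(A), on which the
-- Python A raises IndexError (columns beyond len(A) are never read and stay admitted).
def Pre_print_antidiagonal (A : List (List Int)) : Prop :=
  ∀ row ∈ A, A.length ≤ row.length
instance (A : List (List Int)) : Decidable (Pre_print_antidiagonal A) := by
  unfold Pre_print_antidiagonal; infer_instance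

def pvWitness_print_antidiagonal : List (List Int) := [[1, 2], [3, 4]]

def Spec_print_antidiagonal (A : List (List Int)) (out : List (List Int)) : Prop := out = print_antidiagonal_alt A
instance (A : List (List Int)) (out : List (List Int)) : Decidable (Spec_print_antidiagonal A out) := by unfold Spec_print_antidiagonal; infer_instance

-- ===== CLAIM (what is proved, stated in full; the proofs are below) =====
def Claim_equal_print_antidiagonal : Prop := ∀ (A : List (List Int)), Dom_print_antidiagonal A → Pre_print_antidiagonal A → Spec_print_antidiagonal A (print_antidiagonal A)

-- ===== LEMMAS AND PROOFS =====

-- bucket d after the scatter has processed rows 0..m-1 in full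
def pd (A : List (List Int)) (m d : Nat) : List Int :=
  ((List.range' (d + 1 - A.length) (min d (A.length - 1) + 1 - (d + 1 - A.length))).filter
      (fun i => decide (i < m))).map
    (fun i => (A.getD i []).getD (d - i) 0)

lemma filter_lt_range' (m : Nat) : ∀ (c a : Nat),
    (List.range' a c).filter (fun i => decide (i < m)) = List.range' a (min c (m - a)) := by
  intro c
  induction c with
  | zero => intro a; simp
  | succ c ih =>
    intro a
    rw [List.range'_succ, List.filter_cons]
    by_cases h : a < m
    · have hmin : min (c + 1) (m - a) = min c (m - (a + 1)) + 1 := by omega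
      simp only [h, decide_true, if_true, ih, hmin, List.range'_succ]
    · have h1 : min c (m - (a + 1)) = 0 := by omega
      have h2 : min (c + 1) (m - a) = 0 := by omega
      simp [h, ih, h1, h2]

lemma pd_zero (A : List (List Int)) (d : Nat) : pd A 0 d = [] := by
  simp [pd]

lemma pd_succ (A : List (List Int)) (m d : Nat) (hm : m < A.length) :
    pd A (m + 1) d = pd A m d ++
      (if m ≤ d ∧ d - m < A.length then [(A.getD m []).getD (d - m) 0] else []) := by
  unfold pd
  rw [filter_lt_range', filter_lt_range']
  set n := A.length with hn
  set lo := d + 1 - n with hlo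
  set cnt := min d (n - 1) + 1 - lo with hcnt
  by_cases hc : lo ≤ m ∧ m < lo + cnt
  · have hcond : m ≤ d ∧ d - m < n := by omega
    rw [if_pos hcond]
    have h1 : min cnt (m + 1 - lo) = min cnt (m - lo) + 1 := by omega
    rw [h1, List.range'_1_concat, List.map_append]
    have h2 : lo + min cnt (m - lo) = m := by omega
    rw [h2]
    simp
  · have hcond : ¬ (m ≤ d ∧ d - m < n) := by omega
    rw [if_neg hcond]
    have h1 : min cnt (m + 1 - lo) = min cnt (m - lo) := by omega
    rw [h1, List.append_nil]

-- modifying one position of a mapped range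
lemma map_range_modify (k t : Nat) (f : Nat → List Int) (g : List Int → List Int) :
    ((List.range k).map f).modify t g
      = (List.range k).map (fun d => if t = d then g (f d) else f d) := by
  apply List.ext_getElem
  · simp
  · intro j h1 h2
    have hj : j < k := by simpa using h2
    rw [List.getElem_modify]
    simp

lemma foldl_modify_map (g : List Int → List Int) (js : List Nat) (hnd : js.Nodup)
    (k : Nat) (f : Nat → List Int) :
    js.foldl (fun res i => res.modify i g) ((List.range k).map f)
      = (List.range k).map (fun d => if d ∈ js then g (f d) else f d) := by
  induction js generalizing f with
  | nil => simp
  | cons j js ih =>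
    rcases List.nodup_cons.mp hnd with ⟨hj, hjs⟩
    rw [List.foldl_cons, map_range_modify, ih hjs]
    apply List.map_congr_left
    intro d _
    by_cases hd : d = j
    · subst hd
      have : d ∉ js := hj
      simp [this]
    · simp [hd, Ne.symm hd]

-- inner scatter loop over columns of row m
lemma inner_loop (A : List (List Int)) (m : Nat) (jc : Nat)
    (hj : jc ≤ A.length) :
    (List.range jc).foldl
        (fun res j => res.modify (m + j) (fun l => l ++ [(A.getD m []).getD j 0]))
        ((List.range (2 * A.length - 1)).map (pd A m))
      = (List.range (2 * A.length - 1)).map (fun d => pd A m d ++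
          (if m ≤ d ∧ d - m < jc then [(A.getD m []).getD (d - m) 0] else [])) := by
  induction jc with
  | zero =>
    simp
  | succ jc ih =>
    rw [List.range_succ, List.foldl_append, ih (by omega), List.foldl_cons, List.foldl_nil,
      map_range_modify]
    apply List.map_congr_left
    intro d hd
    have hdlt : d < 2 * A.length - 1 := List.mem_range.mp hd
    clear hd
    by_cases h : m + jc = d
    · have h1 : ¬ (m ≤ d ∧ d - m < jc) := by omega
      have h2 : m ≤ d ∧ d - m < jc + 1 := by omega
      have h3 : d - m = jc := by omega
      simp [h, h2, h3]
    · rw [if_neg h]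
      have : (m ≤ d ∧ d - m < jc) ↔ (m ≤ d ∧ d - m < jc + 1) := by omega
      by_cases h2 : m ≤ d ∧ d - m < jc + 1
      · rw [if_pos (this.mpr h2), if_pos h2]
      · rw [if_neg (fun hx => h2 (this.mp hx)), if_neg h2]

-- outer scatter loop over rows
lemma outer_loop (A : List (List Int)) (mc : Nat) (hm : mc ≤ A.length) :
    (List.range mc).foldl (fun res i =>
        (List.range A.length).foldl
          (fun res j => res.modify (i + j) (fun l => l ++ [(A.getD i []).getD j 0])) res)
        ((List.range (2 * A.length - 1)).map (pd A 0))
      = (List.range (2 * A.length - 1)).map (pd A mc) := by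
  induction mc with
  | zero => simp
  | succ mc ih =>
    rw [List.range_succ, List.foldl_append, ih (by omega), List.foldl_cons, List.foldl_nil,
      inner_loop A mc A.length le_rfl]
    apply List.map_congr_left
    intro d _
    rw [pd_succ A mc d (by omega)]

lemma padTo_eq (n : Nat) (l : List Int) :
    padTo n l = l ++ List.replicate (n - l.length) 0 := by
  generalize hf : n - l.length = fuel
  induction fuel generalizing l with
  | zero =>
    rw [padTo, if_neg (by omega)]
    simp
  | succ fuel ih =>
    rw [padTo, if_pos (by omega), ih (l ++ [0]) (by simp; omega), List.append_assoc]
    congr 1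

lemma pd_full (A : List (List Int)) (d : Nat) :
    pd A A.length d
      = (List.range' (d + 1 - A.length) (min d (A.length - 1) + 1 - (d + 1 - A.length))).map
          (fun i => (A.getD i []).getD (d - i) 0) := by
  unfold pd
  rw [filter_lt_range']
  congr 2
  omega

-- ===== VERDICT (by name: the statement is the Claim_ definition above) =====
theorem print_antidiagonal_spec : Claim_equal_print_antidiagonal := by
  intro A _ _
  unfold Spec_print_antidiagonal print_antidiagonal print_antidiagonal_alt
  have hrep : (List.range (2 * A.length - 1)).map (pd A 0)
      = List.replicate (2 * A.length - 1) ([] : List Int) :=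
    (List.map_congr_left fun d _ => pd_zero A d).trans (by simp)
  rw [← hrep, outer_loop A A.length le_rfl,
    foldl_modify_map (padTo A.length) (List.range (2 * A.length - 1)) (List.nodup_range)]
  apply List.map_congr_left
  intro d hd
  rw [if_pos hd, pd_full A d, padTo_eq]
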